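-- pv_equiv track=rewrite | github.com/microsoft/ExACT | runners/eval/eval_vwa_parallel.py | get_all_run_task_indices
-- ===== SOURCE A (Python) =====
-- def get_task_indices_to_run(remaining_indices: list[int], num_parallel: int, num_task_per_script: int):
--     task_indices_to_run = []
--     for i in range(num_parallel):
--         task_indices = remaining_indices[i * num_task_per_script: (i + 1) * num_task_per_script]
--         task_indices_to_run.append(task_indices)
--     return task_indices_to_run
--
-- def get_all_run_task_indices(all_indices: list[int], num_parallel: int, num_task_per_script: int):
--     finished_indices = set()
--     all_scheduled_indices = []
--     while len(finished_indices) < len(all_indices):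
--         remaining_indices = list(set(all_indices) - finished_indices)
--         remaining_indices.sort()
--         task_indices_to_run = get_task_indices_to_run(
--             remaining_indices,
--             num_parallel=num_parallel,
--             num_task_per_script=num_task_per_script
--         )
--         for ran_indices in task_indices_to_run:
--             if len(ran_indices) == 0:
--                 continue
--             all_scheduled_indices.append(ran_indices)
--             finished_indices.update(ran_indices)
--     return all_scheduled_indices
-- ===== SOURCE B (Python) =====
-- def get_all_run_task_indices(all_indices: list[int], num_parallel: int, num_task_per_script: int):
--     # Sort the distinct indices once, then slice into consecutive chunks of
--     # num_task_per_script; the round structure of the scheduler never changes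
--     # the chunk boundaries, so num_parallel does not affect the result.
--     s = sorted(set(all_indices))
--     out = []
--     while s:
--         out.append(s[:num_task_per_script])
--         s = s[num_task_per_script:]
--     return out
-- ===== Notes on version B (the rewrite author's own statement) =====
-- stated objective: simpler
-- what changed: Instead of A's while-loop that rebuilds and re-sorts the set of remaining indices every scheduling round, B sorts the distinct indices once and slices the sorted list into consecutive chunks of num_task_per_script (num_parallel provably never changes the chunk boundaries).
import Mathlib
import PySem

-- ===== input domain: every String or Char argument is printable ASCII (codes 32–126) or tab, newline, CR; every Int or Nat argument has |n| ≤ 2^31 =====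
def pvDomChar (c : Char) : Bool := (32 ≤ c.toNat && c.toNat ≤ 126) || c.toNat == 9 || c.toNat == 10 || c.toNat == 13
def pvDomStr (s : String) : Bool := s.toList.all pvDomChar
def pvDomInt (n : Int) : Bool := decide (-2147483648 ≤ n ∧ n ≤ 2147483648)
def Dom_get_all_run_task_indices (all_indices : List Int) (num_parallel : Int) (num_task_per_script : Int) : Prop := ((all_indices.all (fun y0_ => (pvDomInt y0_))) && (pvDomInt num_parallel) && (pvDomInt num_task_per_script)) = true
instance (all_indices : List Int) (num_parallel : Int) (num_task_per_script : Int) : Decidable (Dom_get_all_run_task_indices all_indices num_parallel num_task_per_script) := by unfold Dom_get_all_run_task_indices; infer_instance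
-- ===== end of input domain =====

-- B replaces A's repeated rebuild-and-resort scheduling loop by sorting the distinct
-- indices once and slicing into consecutive chunks of num_task_per_script (simpler).

-- ===== PORT A =====
def get_task_indices_to_run (remaining_indices : List Int) (num_parallel : Int) (num_task_per_script : Int) : List (List Int) :=
  (PySem.List.pyRange 0 num_parallel 1).map
    (fun i => PySem.List.slice remaining_indices (some (i * num_task_per_script)) (some ((i + 1) * num_task_per_script)))

-- A's outer while-loop; the fuel only makes it total (under Pre_ it never runs out:
-- every iteration of the Python loop enlarges finished_indices by at least one).
def loopA (fuel : Nat) (all_indices : List Int) (num_parallel : Int) (num_task_per_script : Int)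
    (finished : PySem.Set Int) (acc : List (List Int)) : List (List Int) :=
  match fuel with
  | 0 => acc
  | fuel + 1 =>
    if PySem.Set.len finished < (all_indices.length : Int) then
      let remaining := PySem.List.sorted (PySem.Set.diff (PySem.Set.ofList all_indices) finished) (fun x => x) false
      let chunks := get_task_indices_to_run remaining num_parallel num_task_per_script
      let st := chunks.foldl
        (fun st ch => if ch.length = 0 then st else (st.1 ++ [ch], PySem.Set.update st.2 ch)) (acc, finished)
      loopA fuel all_indices num_parallel num_task_per_script st.2 st.1
    else acc

def get_all_run_task_indices (all_indices : List Int) (num_parallel : Int) (num_task_per_script : Int) : List (List Int) :=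
  loopA (all_indices.length + 1) all_indices num_parallel num_task_per_script PySem.Set.empty []

-- ===== PORT B =====
-- Source B's while loop; fuel makes it total (one element is consumed per iteration under Pre_).
def chunkB (fuel : Nat) (s : List Int) (k : Int) : List (List Int) :=
  match fuel with
  | 0 => []
  | fuel + 1 =>
    if s.isEmpty then []
    else PySem.List.slice s none (some k) :: chunkB fuel (PySem.List.slice s (some k) none) k

def get_all_run_task_indices_alt (all_indices : List Int) (_num_parallel : Int) (num_task_per_script : Int) : List (List Int) :=
  let s := PySem.List.sorted (PySem.Set.ofList all_indices) (fun x => x) false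
  chunkB s.length s num_task_per_script

-- ===== PRECONDITION & SPEC =====
-- Pre_ excludes exactly the inputs on which the Python A never returns (infinite loop):
-- lists with duplicate elements (len(finished) can never reach len(all_indices)), and
-- non-empty lists with num_parallel < 1 or num_task_per_script < 1 (no progress is made).
def Pre_get_all_run_task_indices (all_indices : List Int) (num_parallel : Int) (num_task_per_script : Int) : Prop :=
  all_indices.Nodup ∧ (all_indices = [] ∨ (1 ≤ num_parallel ∧ 1 ≤ num_task_per_script))
instance (all_indices : List Int) (num_parallel : Int) (num_task_per_script : Int) : Decidable (Pre_get_all_run_task_indices all_indices num_parallel num_task_per_script) := by unfold Pre_get_all_run_task_indices; infer_instance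

def pvWitness_get_all_run_task_indices : List Int × Int × Int := ([3, 1, 2, 0, 7], 2, 2)

def Spec_get_all_run_task_indices (all_indices : List Int) (num_parallel : Int) (num_task_per_script : Int) (out : List (List Int)) : Prop := out = get_all_run_task_indices_alt all_indices num_parallel num_task_per_script
instance (all_indices : List Int) (num_parallel : Int) (num_task_per_script : Int) (out : List (List Int)) : Decidable (Spec_get_all_run_task_indices all_indices num_parallel num_task_per_script out) := by unfold Spec_get_all_run_task_indices; infer_instance

-- ===== CLAIM (what is proved, stated in full; the proofs are below) =====
def Claim_equal_get_all_run_task_indices : Prop := ∀ (all_indices : List Int) (num_parallel : Int) (num_task_per_script : Int), Dom_get_all_run_task_indices all_indices num_parallel num_task_per_script → Pre_get_all_run_task_indices all_indices num_parallel num_task_per_script → Spec_get_all_run_task_indices all_indices num_parallel num_task_per_script (get_all_run_task_indices all_indices num_parallel num_task_per_script)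

-- ===== LEMMAS AND PROOFS =====

-- Spec-level chunking function (fuelled), used as common reduct of both sides.
def chunksN : Nat → Nat → List Int → List (List Int)
  | 0, _, _ => []
  | f + 1, kn, s => if s = [] then [] else s.take kn :: chunksN f kn (s.drop kn)

-- The list of chunks one round of A builds (reindexed over Nat).
def csA (kn : Nat) (n : Nat) (s : List Int) : List (List Int) :=
  (List.range n).map (fun i => (s.drop (i * kn)).take kn)

theorem chunksN_nil (f kn : Nat) : chunksN f kn [] = [] := by
  cases f <;> simp [chunksN]

theorem chunkB_eq_chunksN {k : Int} (hk : 0 ≤ k) :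
    ∀ (f : Nat) (s : List Int), chunkB f s k = chunksN f k.toNat s := by
  intro f
  induction f with
  | zero => intro s; rfl
  | succ f ih =>
    intro s
    simp only [chunkB, chunksN, PySem.List.slice_to s hk, PySem.List.slice_from s hk,
      List.isEmpty_iff, ih]

theorem chunksN_fuel {kn : Nat} (hk : 1 ≤ kn) :
    ∀ (f1 f2 : Nat) (s : List Int), s.length ≤ f1 → s.length ≤ f2 →
      chunksN f1 kn s = chunksN f2 kn s := by
  intro f1
  induction f1 with
  | zero =>
    intro f2 s h1 _
    have : s = [] := List.eq_nil_of_length_eq_zero (Nat.le_zero.mp h1)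
    subst this; rw [chunksN_nil, chunksN_nil]
  | succ f1 ih =>
    intro f2 s h1 h2
    cases f2 with
    | zero =>
      have : s = [] := List.eq_nil_of_length_eq_zero (Nat.le_zero.mp h2)
      subst this; rw [chunksN_nil, chunksN_nil]
    | succ f2 =>
      by_cases hs : s = []
      · subst hs; simp [chunksN]
      · have hlen : 1 ≤ s.length := List.length_pos_iff.mpr hs
        have hdl : (s.drop kn).length = s.length - kn := List.length_drop ..
        simp only [chunksN, if_neg hs]
        rw [ih f2 (s.drop kn) (by omega) (by omega)]

theorem gt_eq_csA {p k : Int} (_hp : 0 ≤ p) (hk : 1 ≤ k) (s : List Int) :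
    get_task_indices_to_run s p k = csA k.toNat p.toNat s := by
  unfold get_task_indices_to_run csA
  rw [PySem.List.pyRange_one, List.map_map]
  simp only [Int.sub_zero]
  apply List.map_congr_left
  intro i _
  have h0 : (0 : Int) + (i : Int) = (i : Int) := by ring
  have ha : (0:Int) ≤ (i : Int) * k := by positivity
  have hb : (0:Int) ≤ ((i : Int) + 1) * k := by positivity
  have hk' : k = (k.toNat : Int) := (Int.toNat_of_nonneg (by omega)).symm
  have e1 : ((i : Int) * k).toNat = i * k.toNat := by
    rw [hk', ← Int.natCast_mul, Int.toNat_natCast, Int.toNat_natCast]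
  have e2 : (((i : Int) + 1) * k).toNat = (i + 1) * k.toNat := by
    rw [hk', show ((i : Int) + 1) = ((i + 1 : Nat) : Int) by push_cast; ring,
      ← Int.natCast_mul, Int.toNat_natCast, Int.toNat_natCast]
  simp only [Function.comp, h0, PySem.List.slice_toNat s ha hb, e1, e2]
  congr 1
  rw [Nat.add_mul, Nat.one_mul]
  omega

theorem foldl_round (cs : List (List Int)) :
    ∀ (acc : List (List Int)) (fin : PySem.Set Int),
      cs.foldl (fun st ch => if ch.length = 0 then st
          else (st.1 ++ [ch], PySem.Set.update st.2 ch)) (acc, fin)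
      = (acc ++ cs.filter (fun c => !c.isEmpty), PySem.Set.update fin cs.flatten) := by
  induction cs with
  | nil => intro acc fin; simp [PySem.Set.update_nil]
  | cons c cs ih =>
    intro acc fin
    by_cases hc : c = []
    · subst hc
      simp only [List.foldl_cons, List.length_nil, ih, List.flatten_cons,
        List.nil_append, List.filter_cons]
      simp
    · have hlen : ¬ c.length = 0 := by simpa [List.length_eq_zero_iff] using hc
      simp only [List.foldl_cons, if_neg hlen, ih, List.filter_cons, List.flatten_cons,
        PySem.Set.update_append]
      simp [hc]

theorem flatten_csA {kn : Nat} :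
    ∀ (n : Nat) (s : List Int), (csA kn n s).flatten = s.take (n * kn) := by
  intro n
  induction n with
  | zero => intro s; simp [csA]
  | succ n ih =>
    intro s
    have : csA kn (n + 1) s = csA kn n s ++ [(s.drop (n * kn)).take kn] := by
      simp [csA, List.range_succ]
    rw [this, List.flatten_append, ih]
    simp [List.take_add, Nat.succ_mul]

theorem csA_cons (kn n : Nat) (s : List Int) :
    csA kn (n + 1) s = s.take kn :: csA kn n (s.drop kn) := by
  unfold csA
  rw [List.range_succ_eq_map, List.map_cons, List.map_map]
  simp only [Nat.zero_mul, List.drop_zero]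
  congr 1
  apply List.map_congr_left
  intro i _
  simp only [Function.comp]
  rw [List.drop_drop]
  congr 2
  simp only [Nat.succ_eq_add_one]
  ring

theorem key_split {kn : Nat} (hk : 1 ≤ kn) :
    ∀ (n : Nat) (s : List Int),
      (csA kn n s).filter (fun c => !c.isEmpty)
        ++ chunksN (s.drop (n * kn)).length kn (s.drop (n * kn))
      = chunksN s.length kn s := by
  intro n
  induction n with
  | zero => intro s; simp [csA]
  | succ n ih =>
    intro s
    by_cases hs : s = []
    · subst hs; simp [csA, chunksN_nil]
    · have hlen : 1 ≤ s.length := List.length_pos_iff.mpr hs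
      have htk : ¬ (s.take kn).isEmpty := by
        simp [List.isEmpty_iff, List.take_eq_nil_iff, hs]; omega
      rw [csA_cons]
      have hdd : s.drop ((n + 1) * kn) = (s.drop kn).drop (n * kn) := by
        rw [List.drop_drop]; congr 1; ring
      rw [List.filter_cons]
      simp only [htk, Bool.not_false, if_pos, hdd, List.cons_append, ih (s.drop kn)]
      have hs' : (s.drop kn).length = s.length - kn := List.length_drop ..
      have hrhs : chunksN s.length kn s
          = s.take kn :: chunksN (s.length - 1) kn (s.drop kn) := by
        obtain ⟨m, hm⟩ : ∃ m, s.length = m + 1 := ⟨s.length - 1, by omega⟩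
        rw [hm]
        simp only [chunksN, if_neg hs, Nat.add_sub_cancel]
      rw [hrhs, chunksN_fuel hk ((s.drop kn).length) (s.length - 1) (s.drop kn) le_rfl (by omega)]

theorem len_split {all : List Int} (hall : all.Nodup) (fin : PySem.Set Int)
    (hfn : fin.Nodup) (hfs : ∀ x ∈ fin, x ∈ all) :
    fin.length + (PySem.List.sorted (PySem.Set.diff (PySem.Set.ofList all) fin) (fun x => x) false).length
      = all.length := by
  set s0 := PySem.List.sorted (PySem.Set.diff (PySem.Set.ofList all) fin) (fun x => x) false with hs0
  have hmem : ∀ x, x ∈ s0 ↔ x ∈ all ∧ x ∉ fin := by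
    intro x
    rw [hs0, PySem.List.mem_sorted, PySem.Set.mem_diff, PySem.Set.mem_ofList]
  have hs0n : s0.Nodup :=
    ((PySem.List.sorted_perm _ _ _).nodup_iff).mpr (PySem.Set.nodup_diff _ _ (PySem.Set.nodup_ofList all))
  have happ : (fin ++ s0).Nodup := by
    rw [List.nodup_append]
    refine ⟨hfn, hs0n, ?_⟩
    intro x hx y hy heq
    subst heq
    exact ((hmem x).mp hy).2 hx
  have hperm : (fin ++ s0).Perm all := by
    rw [List.perm_ext_iff_of_nodup happ hall]
    intro x
    rw [List.mem_append, hmem x]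
    constructor
    · rintro (h | h)
      · exact hfs x h
      · exact h.1
    · intro hx
      by_cases hxf : x ∈ fin
      · exact Or.inl hxf
      · exact Or.inr ⟨hx, hxf⟩
  have := hperm.length_eq
  simpa using this

theorem sorted_after_update {all : List Int} (_hall : all.Nodup) (fin : PySem.Set Int)
    (s0 : List Int) (m : Nat)
    (hs0 : s0 = PySem.List.sorted (PySem.Set.diff (PySem.Set.ofList all) fin) (fun x => x) false) :
    PySem.List.sorted (PySem.Set.diff (PySem.Set.ofList all) (PySem.Set.update fin (s0.take m))) (fun x => x) false
      = s0.drop m := by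
  have hmem : ∀ x, x ∈ s0 ↔ x ∈ all ∧ x ∉ fin := by
    intro x
    rw [hs0, PySem.List.mem_sorted, PySem.Set.mem_diff, PySem.Set.mem_ofList]
  have hs0n : s0.Nodup := by
    rw [hs0]
    exact ((PySem.List.sorted_perm _ _ _).nodup_iff).mpr
      (PySem.Set.nodup_diff _ _ (PySem.Set.nodup_ofList all))
  have hsplitn : (s0.take m ++ s0.drop m).Nodup := by
    rw [List.take_append_drop]; exact hs0n
  have hdisj : ∀ x ∈ s0.drop m, x ∉ s0.take m := by
    intro x hx hx'
    exact (List.nodup_append.mp hsplitn).2.2 x hx' x hx rfl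
  apply PySem.List.sorted_id_eq_of_perm_of_pairwise
  · rw [List.perm_ext_iff_of_nodup
      (hs0n.sublist (List.drop_sublist m s0))
      (PySem.Set.nodup_diff _ _ (PySem.Set.nodup_ofList all))]
    intro x
    rw [PySem.Set.mem_diff, PySem.Set.mem_ofList, PySem.Set.mem_update]
    constructor
    · intro hx
      have hxs0 : x ∈ s0 := List.mem_of_mem_drop hx
      refine ⟨((hmem x).mp hxs0).1, ?_⟩
      rintro (h | h)
      · exact ((hmem x).mp hxs0).2 h
      · exact hdisj x hx h
    · rintro ⟨hxa, hxn⟩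
      have hxf : x ∉ fin := fun h => hxn (Or.inl h)
      have hxt : x ∉ s0.take m := fun h => hxn (Or.inr h)
      have hxs0 : x ∈ s0 := (hmem x).mpr ⟨hxa, hxf⟩
      rcases List.mem_append.mp (by rw [List.take_append_drop]; exact hxs0 :
          x ∈ s0.take m ++ s0.drop m) with h | h
      · exact absurd h hxt
      · exact h
  · have : s0.Pairwise (· ≤ ·) := by
      rw [hs0]
      exact PySem.List.sorted_pairwise _ _
    exact this.sublist (List.drop_sublist m s0)

theorem loopA_main {all : List Int} {p k : Int} (hall : all.Nodup)
    (hp : 1 ≤ p) (hk : 1 ≤ k) :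
    ∀ (fuel : Nat) (fin : PySem.Set Int) (acc : List (List Int)) (s0 : List Int),
      s0 = PySem.List.sorted (PySem.Set.diff (PySem.Set.ofList all) fin) (fun x => x) false →
      fin.Nodup → (∀ x ∈ fin, x ∈ all) → s0.length + 1 ≤ fuel →
      loopA fuel all p k fin acc = acc ++ chunksN s0.length k.toNat s0 := by
  intro fuel
  induction fuel with
  | zero => intro fin acc s0 _ _ _ hf; omega
  | succ fuel ih =>
    intro fin acc s0 hs0 hfn hfs hf
    have hlen := len_split hall fin hfn hfs
    rw [← hs0] at hlen
    by_cases hse : s0 = []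
    · have : ¬ (PySem.Set.len fin < (all.length : Int)) := by
        subst hse
        simp only [List.length_nil, Nat.add_zero] at hlen
        simp [PySem.Set.len, hlen]
      simp only [loopA, if_neg this]
      subst hse
      simp [chunksN]
    · have hslen : 1 ≤ s0.length := List.length_pos_iff.mpr hse
      have hcond : PySem.Set.len fin < (all.length : Int) := by
        simp only [PySem.Set.len]
        omega
      have hkn : 1 ≤ k.toNat := by omega
      have hpn : 1 ≤ p.toNat := by omega
      set m : Nat := p.toNat * k.toNat with hm
      have hm1 : 1 ≤ m := Nat.one_le_iff_ne_zero.mpr (by positivity)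
      have hsub : ∀ x ∈ PySem.Set.update fin (s0.take m), x ∈ all := by
        intro x hx
        rcases (PySem.Set.mem_update fin _ x).mp hx with h | h
        · exact hfs x h
        · have hxs0 : x ∈ s0 := List.mem_of_mem_take h
          rw [hs0, PySem.List.mem_sorted, PySem.Set.mem_diff, PySem.Set.mem_ofList] at hxs0
          exact hxs0.1
      simp only [loopA, if_pos hcond]
      rw [← hs0, gt_eq_csA (by omega) hk, foldl_round, flatten_csA]
      rw [ih (PySem.Set.update fin (s0.take m))
          (acc ++ (csA k.toNat p.toNat s0).filter (fun c => !c.isEmpty))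
          (s0.drop m) (sorted_after_update hall fin s0 m hs0).symm
          (PySem.Set.nodup_update fin _ hfn) hsub
          (by rw [List.length_drop]; omega)]
      rw [List.append_assoc, key_split hkn p.toNat s0]

-- set(xs) - set() = set(xs)
theorem diff_empty (s : PySem.Set Int) : PySem.Set.diff s PySem.Set.empty = s := by
  simp [PySem.Set.diff, PySem.Set.empty]

-- ===== VERDICT (by name: the statement is the Claim_ definition above) =====
theorem get_all_run_task_indices_spec : Claim_equal_get_all_run_task_indices := by
  intro all p k _ hpre
  unfold Spec_get_all_run_task_indices
  obtain ⟨hall, hcase⟩ := hpre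
  rcases hcase with hnil | ⟨hp, hk⟩
  · subst hnil
    simp [get_all_run_task_indices, get_all_run_task_indices_alt, loopA,
      PySem.Set.len, PySem.Set.empty, PySem.Set.ofList, chunkB]
  · have hOf : PySem.Set.ofList all = all := PySem.Set.ofList_eq_self_of_nodup all hall
    set s0 : List Int := PySem.List.sorted all (fun x => x) false with hs0d
    have hs0 : s0 = PySem.List.sorted (PySem.Set.diff (PySem.Set.ofList all) PySem.Set.empty) (fun x => x) false := by
      rw [diff_empty, hOf]
    have hs0len : s0.length = all.length := by
      rw [hs0d, PySem.List.length_sorted]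
    unfold get_all_run_task_indices get_all_run_task_indices_alt
    rw [hOf, ← hs0d, chunkB_eq_chunksN (by omega : (0:Int) ≤ k)]
    rw [loopA_main hall hp hk (all.length + 1) PySem.Set.empty [] s0 hs0
      List.nodup_nil (by intro x hx; cases hx) (by omega)]
    simp
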